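-- pv_equiv track=rewrite | github.com/xingniu/multitask-ft-fsmt | LePoD/lepod-score.py | _get_new_idx
-- ===== SOURCE A (Python) =====
-- IN_PHRASE = -1
--
-- def _get_new_idx(alignment):
--     new_idx = [None] * len(alignment)
--     counter = 0
--     for idx, align in enumerate(alignment):
--         if align is not None and align != IN_PHRASE:
--             new_idx[idx] = counter
--             counter += 1
--     return new_idx, counter
-- ===== SOURCE B (Python) =====
-- IN_PHRASE = -1
--
-- def _get_new_idx(alignment):
--     mask = [0 if a is None or a == IN_PHRASE else 1 for a in alignment]
--     prefix = [0]
--     for m in mask: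
--         prefix.append(prefix[-1] + m)
--     new_idx = [prefix[i + 1] - 1 if mask[i] else None for i in range(len(alignment))]
--     return new_idx, prefix[-1]
-- ===== Notes on version B (the rewrite author's own statement) =====
-- stated objective: alternative
-- what changed: Replaces the fused loop with a live incrementing counter by a 0/1 qualifying mask, an explicit prefix-sum array, and a final map assigning prefix[i+1]-1 to qualifying positions; the total is read off the last prefix entry.
import Mathlib
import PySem

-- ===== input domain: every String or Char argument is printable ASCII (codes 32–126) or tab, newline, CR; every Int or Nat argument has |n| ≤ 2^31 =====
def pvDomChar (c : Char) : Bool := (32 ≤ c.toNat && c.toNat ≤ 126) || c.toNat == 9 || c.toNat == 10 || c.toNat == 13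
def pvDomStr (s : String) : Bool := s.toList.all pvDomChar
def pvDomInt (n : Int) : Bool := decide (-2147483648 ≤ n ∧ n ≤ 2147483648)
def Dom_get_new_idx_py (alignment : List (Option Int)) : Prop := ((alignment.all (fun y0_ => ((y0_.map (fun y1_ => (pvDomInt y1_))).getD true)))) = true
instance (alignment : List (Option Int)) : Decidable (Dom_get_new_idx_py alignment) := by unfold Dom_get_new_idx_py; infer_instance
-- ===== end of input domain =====

-- B replaces A's fused counter loop by a 0/1 mask, an explicit prefix-sum array and a final map (alternative decomposition, same cost).


-- ===== PORT A =====
def get_new_idx_py (alignment : List (Option Int)) : List (Option Int) × Int :=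
  let init : List (Option Int) × Int := (List.replicate alignment.length none, 0)
  (PySem.List.enumerate alignment 0).foldl
    (fun st p =>
      match p.2 with
      | some align => if align ≠ -1 then (st.1.set p.1.toNat (some st.2), st.2 + 1) else st
      | none => st) init

-- ===== PORT B =====
def get_new_idx_py_alt (alignment : List (Option Int)) : List (Option Int) × Int :=
  let mask : List Int := alignment.map (fun a => match a with | none => (0 : Int) | some v => if v = -1 then 0 else 1)
  -- prefix[-1] on the always-nonempty prefix list is exactly its last element (getLastD)
  let pre : List Int := mask.foldl (fun p m => p ++ [p.getLastD 0 + m]) [0]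
  let new_idx : List (Option Int) :=
    (List.range alignment.length).map (fun i => if mask.getD i 0 ≠ 0 then some (pre.getD (i + 1) 0 - 1) else none)
  (new_idx, pre.getLastD 0)

-- ===== PRECONDITION & SPEC =====
def Spec_get_new_idx_py (alignment : List (Option Int)) (out : List (Option Int) × Int) : Prop := out = get_new_idx_py_alt alignment
instance (alignment : List (Option Int)) (out : List (Option Int) × Int) : Decidable (Spec_get_new_idx_py alignment out) := by unfold Spec_get_new_idx_py; infer_instance

-- ===== CLAIM (what is proved, stated in full; the proofs are below) =====
def Claim_equal_get_new_idx_py : Prop := ∀ (alignment : List (Option Int)), Dom_get_new_idx_py alignment → Spec_get_new_idx_py alignment (get_new_idx_py alignment)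

-- ===== LEMMAS AND PROOFS =====

-- the (pure) mask function of port B
def pvMb (a : Option Int) : Int := match a with | none => (0 : Int) | some v => if v = -1 then 0 else 1

-- common recursive reference: the new-index list and final counter, starting the counter at c
def pvGo : List (Option Int) → Int → List (Option Int) × Int
  | [], c => ([], c)
  | a :: t, c =>
      if pvMb a = 0 then
        let r := pvGo t c; (none :: r.1, r.2)
      else
        let r := pvGo t (c + 1); (some c :: r.1, r.2)

-- running prefix sums starting from s (without the leading s)
def pvPs : Int → List Int → List Int
  | _, [] => []
  | s, m :: t => (s + m) :: pvPs (s + m) t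

lemma pvPre_inv (mask : List Int) : ∀ (acc : List Int), acc ≠ [] →
    mask.foldl (fun p m => p ++ [p.getLastD 0 + m]) acc = acc ++ pvPs (acc.getLastD 0) mask := by
  induction mask with
  | nil => intro acc _; simp [pvPs]
  | cons m t ih =>
      intro acc hacc
      have h1 : (acc ++ [acc.getLastD 0 + m]).getLastD 0 = acc.getLastD 0 + m := by
        simp
      simp only [List.foldl_cons]
      rw [ih (acc ++ [acc.getLastD 0 + m]) (by simp), h1, pvPs, List.append_assoc]
      simp

lemma pvLast_indep (x : Int) (xs : List Int) (d e : Int) :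
    (x :: xs).getLastD d = (x :: xs).getLastD e := by
  induction xs generalizing x with
  | nil => rfl
  | cons y ys ih => simpa using ih y

lemma pvGo_closed (l : List (Option Int)) : ∀ (c : Int),
    pvGo l c =
      ((List.range l.length).map
        (fun i => if (l.map pvMb).getD i 0 ≠ 0 then some ((pvPs c (l.map pvMb)).getD i 0 - 1) else none),
       (c :: pvPs c (l.map pvMb)).getLastD 0) := by
  induction l with
  | nil => intro c; simp [pvGo, pvPs]
  | cons a t ih =>
      intro c
      have hps : pvPs c ((a :: t).map pvMb) = (c + pvMb a) :: pvPs (c + pvMb a) (t.map pvMb) := rfl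
      by_cases h : pvMb a = 0
      · have hgo : pvGo (a :: t) c = (none :: (pvGo t c).1, (pvGo t c).2) := by
          simp [pvGo, h]
        rw [hgo, ih c]
        refine Prod.ext ?_ ?_
        · simp only [List.length_cons, List.range_succ_eq_map, List.map_cons, List.map_map,
            List.map_cons, List.getD_cons_zero, h, ne_eq, not_true_eq_false, if_false]
          refine congrArg₂ _ (by simp) ?_
          apply List.map_congr_left
          intro i _
          simp [Function.comp, pvPs]
        · simp only [hps, h, add_zero]
          rw [List.getLastD_cons (l := c :: pvPs c (t.map pvMb))]
          exact (pvLast_indep c (pvPs c (t.map pvMb)) 0 c).symm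
      · have h1 : pvMb a = 1 := by
          cases a with
          | none => simp [pvMb] at h
          | some v => simp only [pvMb] at h ⊢ ; split_ifs at h ⊢ <;> simp_all
        have hgo : pvGo (a :: t) c = (some c :: (pvGo t (c + 1)).1, (pvGo t (c + 1)).2) := by
          simp [pvGo, h]
        rw [hgo, ih (c + 1)]
        refine Prod.ext ?_ ?_
        · simp only [List.length_cons, List.range_succ_eq_map, List.map_cons, List.map_map,
            List.map_cons]
          refine congrArg₂ _ ?_ ?_
          · simp [pvPs]; exact ⟨h, by rw [h1]; ring⟩
          · apply List.map_congr_left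
            intro i _
            simp [Function.comp, pvPs, h1]
        · simp only [hps, h1]
          rw [List.getLastD_cons (l := (c + 1) :: pvPs (c + 1) (t.map pvMb))]
          exact (pvLast_indep (c + 1) (pvPs (c + 1) (t.map pvMb)) 0 c).symm

lemma pvA_inv (l : List (Option Int)) : ∀ (buf : List (Option Int)) (c : Int),
    (PySem.List.enumerate l (buf.length : Int)).foldl
      (fun st p =>
        match p.2 with
        | some align => if align ≠ -1 then (st.1.set p.1.toNat (some st.2), st.2 + 1) else st
        | none => st)
      (buf ++ List.replicate l.length none, c)
    = (buf ++ (pvGo l c).1, (pvGo l c).2) := by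
  induction l with
  | nil => intro buf c; simp [pvGo, PySem.List.enumerate_nil]
  | cons a t ih =>
      intro buf c
      rw [PySem.List.enumerate_cons, List.foldl_cons]
      have hrep : List.replicate (a :: t).length (none : Option Int)
          = none :: List.replicate t.length none := by
        simp [List.replicate_succ]
      have hsplit : ∀ (w : Option Int),
          buf ++ w :: List.replicate t.length none
            = (buf ++ [w]) ++ List.replicate t.length none := by
        intro w; simp
      have hlen : ∀ (w : Option Int),
          ((buf.length : Int) + 1) = (((buf ++ [w]).length : Int)) := by
        intro w; simp
      cases a with
      | none =>
          have hgo : pvGo (none :: t) c = (none :: (pvGo t c).1, (pvGo t c).2) := by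
            simp [pvGo, pvMb]
          rw [hgo, hrep]
          simp only
          rw [hsplit none, hlen none, ih (buf ++ [none]) c]
          simp
      | some v =>
          by_cases hv : v = -1
          · subst hv
            have hgo : pvGo (some (-1 : Int) :: t) c = (none :: (pvGo t c).1, (pvGo t c).2) := by
              simp [pvGo, pvMb]
            rw [hgo, hrep]
            simp only [ne_eq, not_true_eq_false, if_false]
            rw [hsplit none, hlen none, ih (buf ++ [none]) c]
            simp
          · have hgo : pvGo (some v :: t) c = (some c :: (pvGo t (c + 1)).1, (pvGo t (c + 1)).2) := by
              simp [pvGo, pvMb, hv]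
            rw [hgo, hrep]
            simp only [ne_eq, hv, not_false_eq_true, if_true]
            have hset : (buf ++ none :: List.replicate t.length none).set
                ((buf.length : Int)).toNat (some c)
                = (buf ++ [some c]) ++ List.replicate t.length none := by
              rw [show ((buf.length : Int)).toNat = buf.length by simp,
                List.set_append_right _ _ (le_refl _)]
              simp
            rw [hset, hlen (some c), ih (buf ++ [some c]) (c + 1)]
            simp

lemma pvA_eq_go (l : List (Option Int)) : get_new_idx_py l = pvGo l 0 := by
  have h := pvA_inv l [] 0
  simpa [get_new_idx_py] using h

lemma pvB_eq_go (l : List (Option Int)) : get_new_idx_py_alt l = pvGo l 0 := by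
  unfold get_new_idx_py_alt
  have hmask : l.map (fun a => match a with | none => (0 : Int) | some v => if v = -1 then 0 else 1)
      = l.map pvMb := rfl
  simp only [hmask]
  rw [pvPre_inv (l.map pvMb) [0] (by simp)]
  rw [pvGo_closed l 0]
  refine Prod.ext ?_ ?_
  · simp
  · simp

-- ===== VERDICT (by name: the statement is the Claim_ definition above) =====
theorem get_new_idx_py_spec : Claim_equal_get_new_idx_py := by
  intro alignment _
  unfold Spec_get_new_idx_py
  rw [pvA_eq_go, pvB_eq_go]
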